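-- pv_equiv track=rewrite | github.com/sayantan-hazra/3RD-SEM-PYTHON-ASSIGNMENTS | 8. List Manipulation II/program 9.py | freq_greater_than_k
-- ===== SOURCE A (Python) =====
-- def freq_greater_than_k(lst, k):
--     res_list = []
--     for i in lst:
--         count = 0
--         for j in lst:
--             if j == i:
--                 count += 1
--         if count > k and i not in res_list:
--             res_list.append(i)
--     return res_list
-- ===== SOURCE B (Python) =====
-- def freq_greater_than_k(lst, k):
--     counts = {}
--     for x in lst:
--         counts[x] = counts.get(x, 0) + 1
--     return [x for x in counts if counts[x] > k]
-- ===== Notes on version B (the rewrite author's own statement) =====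
-- stated objective: faster
-- what changed: Replaces A's per-element full rescan and 'not in res_list' dedup append with a single counting pass into a dict followed by one filter over the distinct keys (first-insertion order).
import Mathlib
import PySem

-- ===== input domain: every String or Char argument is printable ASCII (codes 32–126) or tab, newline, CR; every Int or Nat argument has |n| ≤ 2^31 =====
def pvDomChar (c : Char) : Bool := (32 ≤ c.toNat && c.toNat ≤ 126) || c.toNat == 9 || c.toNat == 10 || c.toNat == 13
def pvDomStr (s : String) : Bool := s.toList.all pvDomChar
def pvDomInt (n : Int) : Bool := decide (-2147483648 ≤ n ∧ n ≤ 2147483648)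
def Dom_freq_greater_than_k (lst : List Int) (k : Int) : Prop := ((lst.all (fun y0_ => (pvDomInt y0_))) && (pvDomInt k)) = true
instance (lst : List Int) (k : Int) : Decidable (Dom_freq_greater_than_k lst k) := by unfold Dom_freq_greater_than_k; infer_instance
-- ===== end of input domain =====

-- B replaces A's quadratic rescan-per-element (with a 'not in res_list' dedup check) by one
-- counting pass into an insertion-ordered dict and a filter over its distinct keys (objective: faster).


-- ===== PORT A =====
def freq_greater_than_k (lst : List Int) (k : Int) : List Int :=
  lst.foldl
    (fun res_list i =>
      let count := lst.foldl (fun count j => if j == i then count + 1 else count) (0 : Int)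
      if count > k ∧ i ∉ res_list then res_list ++ [i] else res_list)
    []

-- ===== PORT B =====
def freq_greater_than_k_alt (lst : List Int) (k : Int) : List Int :=
  let counts := lst.foldl (fun d x => d.insert x (d.getD x 0 + 1)) (PySem.Dict.empty : PySem.Dict Int Int)
  counts.keys.filter (fun x => decide (counts.getD x 0 > k))

-- ===== PRECONDITION & SPEC =====
def Spec_freq_greater_than_k (lst : List Int) (k : Int) (out : List Int) : Prop := out = freq_greater_than_k_alt lst k
instance (lst : List Int) (k : Int) (out : List Int) : Decidable (Spec_freq_greater_than_k lst k out) := by unfold Spec_freq_greater_than_k; infer_instance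

-- ===== CLAIM (what is proved, stated in full; the proofs are below) =====
def Claim_equal_freq_greater_than_k : Prop := ∀ (lst : List Int) (k : Int), Dom_freq_greater_than_k lst k → Spec_freq_greater_than_k lst k (freq_greater_than_k lst k)

-- ===== LEMMAS AND PROOFS =====

-- A's loop over a remaining suffix l, with the already-seen distinct elements s: the accumulator
-- stays 'the kept elements among the first occurrences so far'.
theorem freq_A_loop (p : Int → Bool) :
    ∀ (l s : List Int),
      l.foldl (fun res i => if p i = true ∧ i ∉ res then res ++ [i] else res) (s.filter p)
        = (PySem.Set.update s l).filter p := by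
  intro l
  induction l with
  | nil => intro s; rfl
  | cons x t ih =>
    intro s
    have hstep :
        (if p x = true ∧ x ∉ s.filter p then s.filter p ++ [x] else s.filter p)
          = (PySem.Set.add s x).filter p := by
      by_cases hx : x ∈ s
      · have hadd : PySem.Set.add s x = s := by
          simp [PySem.Set.add, PySem.Set.contains, hx]
        by_cases hp : p x = true
        · have : x ∈ s.filter p := List.mem_filter.mpr ⟨hx, hp⟩
          simp [hadd, this]
        · simp [hadd, hp]
      · have hadd : PySem.Set.add s x = s ++ [x] := by
          simp [PySem.Set.add, PySem.Set.contains, hx]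
        by_cases hp : p x = true
        · have hnot : x ∉ s.filter p := fun h => hx (List.mem_filter.mp h).1
          simp [hadd, hp, hnot, List.filter_append]
        · simp [hadd, hp, List.filter_append]
    calc (x :: t).foldl (fun res i => if p i = true ∧ i ∉ res then res ++ [i] else res) (s.filter p)
        = t.foldl (fun res i => if p i = true ∧ i ∉ res then res ++ [i] else res)
            ((PySem.Set.add s x).filter p) := by
          simp only [List.foldl_cons]; rw [hstep]
      _ = (PySem.Set.update (PySem.Set.add s x) t).filter p := ih (PySem.Set.add s x)
      _ = (PySem.Set.update s (x :: t)).filter p := by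
          simp [PySem.Set.update, List.foldl_cons]

-- ===== VERDICT (by name: the statement is the Claim_ definition above) =====
theorem freq_greater_than_k_spec : Claim_equal_freq_greater_than_k := by
  intro lst k _
  unfold Spec_freq_greater_than_k freq_greater_than_k freq_greater_than_k_alt
  -- B side: the counting loop is Counter(lst); keys = distinct elements in first-occurrence order
  rw [PySem.Dict.foldl_insert_getD_add_one_eq_counter]
  have hB : (PySem.Dict.counter lst).keys.filter
        (fun x => decide ((PySem.Dict.counter lst).getD x 0 > k))
      = (PySem.Set.ofList lst).filter (fun x => decide ((lst.count x : Int) > k)) := by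
    rw [PySem.Dict.keys_counter]
    apply List.filter_congr
    intro x _
    rw [PySem.Dict.getD_counter]
  rw [hB]
  -- A side: the inner loop is lst.count i
  have hA : lst.foldl
      (fun res_list i =>
        let count := lst.foldl (fun count j => if j == i then count + 1 else count) (0 : Int)
        if count > k ∧ i ∉ res_list then res_list ++ [i] else res_list) []
      = lst.foldl
        (fun res i =>
          if (decide ((lst.count i : Int) > k)) = true ∧ i ∉ res then res ++ [i] else res) [] := by
    apply PySem.List.foldl_congr_mem
    intro acc x _
    simp only [PySem.List.foldl_beq_add_one, zero_add]
    by_cases h : (lst.count x : Int) > k <;> simp [h]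
  rw [hA]
  have := freq_A_loop (fun x => decide ((lst.count x : Int) > k)) lst []
  simpa [PySem.Set.update, PySem.Set.ofList_eq_foldl] using this
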